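-- pv_equiv track=rewrite | github.com/RedHatInsights/tangerine-backend | connectors/db/file.py | _remove_large_md_code_blocks
-- ===== SOURCE A (Python) =====
-- def _remove_large_md_code_blocks(text):
--     """
--     Replaces markdown code blocks longer than 9 lines with redirection text
--
--     This is to avoid large code blocks getting broken up across text chunks
--     """
--     lines = []
--     code_lines = []
--     in_code_block = False
--     for line in text.split("\n"):
--         if line.lstrip().startswith("```") and not in_code_block:
--             in_code_block = True
--             code_lines = []
--             code_lines.append(line)
--         elif line.lstrip().startswith("```") and in_code_block:
--             code_lines.append(line)
--             in_code_block = False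
--             if len(code_lines) > 9:
--                 # remove this block because it is too long, but preserve indentation of the block
--                 whitespace = " " * (len(line) - len(line.lstrip()))
--                 code_lines = [
--                     line,
--                     f"{whitespace}<large code block, visit documentation to view>",
--                     line,
--                 ]
--             lines.extend(code_lines)
--         elif in_code_block:
--             code_lines.append(line)
--         else:
--             lines.append(line)
--
--     return "\n".join(lines)
-- ===== SOURCE B (Python) =====
-- def _remove_large_md_code_blocks(text):
--     """
--     Replaces markdown code blocks longer than 9 lines with redirection text
--
--     This is to avoid large code blocks getting broken up across text chunks
--     """
--     lines = text.split("\n")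
--     n = len(lines)
--     out = []
--     i = 0
--     while i < n:
--         line = lines[i]
--         if not line.lstrip().startswith("```"):
--             out.append(line)
--             i += 1
--             continue
--         # opening fence: scan forward for the closing fence
--         j = i + 1
--         while j < n and not lines[j].lstrip().startswith("```"):
--             j += 1
--         if j == n:
--             # unclosed block: it is dropped entirely
--             break
--         if j - i + 1 > 9:
--             closer = lines[j]
--             ws = " " * (len(closer) - len(closer.lstrip()))
--             out.extend([closer, ws + "<large code block, visit documentation to view>", closer])
--         else:
--             out.extend(lines[i:j + 1])
--         i = j + 1
--     return "\n".join(out)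
-- ===== Notes on version B (the rewrite author's own statement) =====
-- stated objective: alternative
-- what changed: A's single stateful pass with an in_code_block flag and a code_lines buffer is replaced by an index walk over the split lines that, at each opening fence, scans forward for the closing fence and emits the whole segment (or the placeholder) at once, dropping any unclosed trailing block by stopping.
import Mathlib
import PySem

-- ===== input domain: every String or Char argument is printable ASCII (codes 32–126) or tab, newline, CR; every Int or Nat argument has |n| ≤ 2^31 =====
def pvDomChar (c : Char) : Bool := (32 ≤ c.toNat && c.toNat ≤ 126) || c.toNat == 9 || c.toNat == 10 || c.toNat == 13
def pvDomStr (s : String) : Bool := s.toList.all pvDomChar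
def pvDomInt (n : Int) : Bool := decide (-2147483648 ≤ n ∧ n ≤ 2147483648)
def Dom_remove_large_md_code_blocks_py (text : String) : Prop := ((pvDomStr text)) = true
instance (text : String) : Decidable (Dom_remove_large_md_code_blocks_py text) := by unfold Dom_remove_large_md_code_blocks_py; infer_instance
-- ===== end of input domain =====

-- B replaces A's stateful one-pass toggle (in_code_block flag + code buffer) by an index
-- walk that, at each opening fence, scans forward for the closing fence and emits the
-- whole segment (or the placeholder) at once: a different decomposition, same cost.

-- text.split("\n")  (sep is the non-empty literal "\n", so split? is always some; getD is exact)
def pvLines (text : String) : List String := (PySem.Str.split? text "\n").getD []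

-- line.lstrip().startswith("```")  (the same Python expression appears in A and in B)
def pvFence (line : String) : Bool := PySem.Str.startswith (PySem.Str.lstrip line) "```"

-- " " * (len(line) - len(line.lstrip())) + "<large code block, visit documentation to view>"
-- (string repetition ported by hand as List.replicate; exact since lstrip is a suffix)
def pvPlaceholder (line : String) : String :=
  String.ofList (List.replicate (line.toList.length - (PySem.Str.lstrip line).toList.length) ' ')
    ++ "<large code block, visit documentation to view>"

-- ===== PORT A =====
-- one iteration of A's for-loop; state = (lines, code_lines, in_code_block)
def pvAStep (st : List String × List String × Bool) (line : String) :
    List String × List String × Bool :=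
  let (lines, code, inb) := st
  if pvFence line && !inb then
    (lines, [line], true)
  else if pvFence line && inb then
    let code1 := code ++ [line]
    let code2 := if code1.length > 9 then [line, pvPlaceholder line, line] else code1
    (lines ++ code2, code2, false)
  else if inb then
    (lines, code ++ [line], true)
  else
    (lines ++ [line], code, false)

def remove_large_md_code_blocks_py (text : String) : String :=
  PySem.Str.join "\n" ((pvLines text).foldl pvAStep ([], [], false)).1

-- ===== PORT B =====
-- Source B's inner while-j loop: find the first fence line; returns (lines before it, it, rest)
def pvScan (ls : List String) : Option (List String × String × List String) :=
  match ls with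
  | [] => none
  | l :: rest =>
    if pvFence l then some ([], l, rest)
    else
      match pvScan rest with
      | none => none
      | some (b, c, r) => some (l :: b, c, r)

theorem pvScan_length {ls : List String} {b : List String} {c : String} {r : List String}
    (h : pvScan ls = some (b, c, r)) : r.length < ls.length := by
  induction ls generalizing b c r with
  | nil => simp [pvScan] at h
  | cons l rest ih =>
    by_cases hf : pvFence l
    · simp [pvScan, hf] at h
      simp [h.2.2]
    · rw [pvScan] at h
      simp only [hf] at h
      cases hs : pvScan rest with
      | none => rw [hs] at h; simp at h
      | some p =>
        obtain ⟨b', c', r'⟩ := p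
        rw [hs] at h
        simp at h
        obtain ⟨h1, h2, h3⟩ := h
        subst h3
        have := ih hs
        simp only [List.length_cons]
        omega

-- Source B's outer while-i loop, as recursion on the suffix of the line list
def pvBGo (ls : List String) : List String :=
  match ls with
  | [] => []
  | l :: rest =>
    if pvFence l then
      match hs : pvScan rest with
      | none => []
      | some (b, c, r) =>
        (if (l :: (b ++ [c])).length > 9 then [c, pvPlaceholder c, c] else l :: (b ++ [c]))
          ++ pvBGo r
    else l :: pvBGo rest
termination_by ls.length
decreasing_by
  · exact Nat.lt_succ_of_lt (pvScan_length hs)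
  · simp

def remove_large_md_code_blocks_py_alt (text : String) : String :=
  PySem.Str.join "\n" (pvBGo (pvLines text))

-- ===== PRECONDITION & SPEC =====
def Spec_remove_large_md_code_blocks_py (text : String) (out : String) : Prop := out = remove_large_md_code_blocks_py_alt text
instance (text : String) (out : String) : Decidable (Spec_remove_large_md_code_blocks_py text out) := by unfold Spec_remove_large_md_code_blocks_py; infer_instance

-- ===== CLAIM (what is proved, stated in full; the proofs are below) =====
def Claim_equal_remove_large_md_code_blocks_py : Prop := ∀ (text : String), Dom_remove_large_md_code_blocks_py text → Spec_remove_large_md_code_blocks_py text (remove_large_md_code_blocks_py text)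

-- ===== LEMMAS AND PROOFS =====

-- what A's fold produces from state (out, code, true): the pending block closed by the
-- first fence of ls (placeholder if long), then pvBGo on the remainder; [] if unclosed
def pvInBlock (code : List String) (ls : List String) : List String :=
  match pvScan ls with
  | none => []
  | some (b, c, r) =>
    (if (code ++ b ++ [c]).length > 9 then [c, pvPlaceholder c, c] else code ++ b ++ [c])
      ++ pvBGo r

theorem pvFold_spec (ls : List String) :
    (∀ out code, (ls.foldl pvAStep (out, code, false)).1 = out ++ pvBGo ls) ∧
    (∀ out code, (ls.foldl pvAStep (out, code, true)).1 = out ++ pvInBlock code ls) := by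
  induction ls with
  | nil => simp [pvBGo, pvInBlock, pvScan]
  | cons l rest ih =>
    constructor
    · intro out code
      by_cases hf : pvFence l
      · rw [List.foldl_cons]
        have h1 : pvAStep (out, code, false) l = (out, [l], true) := by
          simp [pvAStep, hf]
        rw [h1, ih.2]
        rw [pvBGo]
        simp only [hf, if_true]
        unfold pvInBlock
        cases hs : pvScan rest with
        | none => simp
        | some p =>
          obtain ⟨b, c, r⟩ := p
          simp [List.length_append]
      · rw [List.foldl_cons]
        have h1 : pvAStep (out, code, false) l = (out ++ [l], code, false) := by
          simp [pvAStep, hf]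
        rw [h1, ih.1]
        rw [pvBGo]
        simp [hf]
    · intro out code
      by_cases hf : pvFence l
      · rw [List.foldl_cons]
        have h1 : pvAStep (out, code, true) l =
            (out ++ (if (code ++ [l]).length > 9 then [l, pvPlaceholder l, l] else code ++ [l]),
             (if (code ++ [l]).length > 9 then [l, pvPlaceholder l, l] else code ++ [l]), false) := by
          simp [pvAStep, hf]
        rw [h1, ih.1]
        unfold pvInBlock
        have hs : pvScan (l :: rest) = some ([], l, rest) := by simp [pvScan, hf]
        rw [hs]
        simp [List.append_assoc]
      · rw [List.foldl_cons]
        have h1 : pvAStep (out, code, true) l = (out, code ++ [l], true) := by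
          simp [pvAStep, hf]
        rw [h1, ih.2]
        unfold pvInBlock
        have hs : pvScan (l :: rest) =
            match pvScan rest with
            | none => none
            | some (b, c, r) => some (l :: b, c, r) := by simp [pvScan, hf]
        rw [hs]
        cases hs' : pvScan rest with
        | none => simp
        | some p =>
          obtain ⟨b, c, r⟩ := p
          simp [List.append_assoc]

-- ===== VERDICT (by name: the statement is the Claim_ definition above) =====
theorem remove_large_md_code_blocks_py_spec : Claim_equal_remove_large_md_code_blocks_py := by
  intro text _
  unfold Spec_remove_large_md_code_blocks_py remove_large_md_code_blocks_py
    remove_large_md_code_blocks_py_alt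
  rw [(pvFold_spec (pvLines text)).1 [] []]
  simp
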